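-- pv_equiv track=rewrite | github.com/AdrianKuca/pacan2 | boardOpsInside.py | skewCollision
-- ===== SOURCE A (Python) =====
-- topSignature = "abcdefgh"
--
-- leftSignature = "87654321"
--
-- def skewCollision(start, end, allPositions, hit):
--     startXIndex = topSignature.find(start[0])
--     startYIndex = leftSignature.find(start[1])
--     endXIndex = topSignature.find(end[0])
--     endYIndex = leftSignature.find(end[1])
--     leftToRight = True if endXIndex > startXIndex else False
--     topToBottom = True if endYIndex > startYIndex else False
--     distance = abs(endXIndex - startXIndex)
--     if (startXIndex + (distance if leftToRight else -distance)) > 7 \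
--             or (startYIndex + (distance if topToBottom else -distance)) > 7 \
--             or (startXIndex + (distance if leftToRight else -distance)) < 0 \
--             or (startYIndex + (distance if topToBottom else -distance)) < 0:
--         return False, ["error"]
--     if topSignature[startXIndex + (distance if leftToRight else -distance)] != end[0] or leftSignature[startYIndex + (distance if topToBottom else -distance)] != end[1]:
--         return False, ["error"]
--     obstacles = []
--     for color in allPositions:
--         for pawn in allPositions[color]:
--             for p in allPositions[color][pawn]:
--                 obstacleXIndex = topSignature.find(p[0])
--                 obstacleYIndex = leftSignature.find(p[1])
--                 for i in range(1, distance+(1 if not hit else 0)):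
--                     x = i if leftToRight else -i
--                     y = i if topToBottom else -i
--                     if obstacleXIndex == startXIndex+x and obstacleYIndex == startYIndex+y:
--                         obstacles.append(p)
--     if len(obstacles) > 0:
--         return True, obstacles
--     else:
--         return False, []
-- ===== SOURCE B (Python) =====
-- topSignature = "abcdefgh"
--
-- leftSignature = "87654321"
--
-- def skewCollision(start, end, allPositions, hit):
--     sx = topSignature.find(start[0])
--     sy = leftSignature.find(start[1])
--     ex = topSignature.find(end[0])
--     ey = leftSignature.find(end[1])
--     # valid diagonal move: end square on the board and |dx| == |dy|
--     if ex < 0 or ey < 0 or abs(ex - sx) != abs(ey - sy):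
--         return False, ["error"]
--     dx = 1 if ex > sx else -1
--     dy = 1 if ey > sy else -1
--     lim = abs(ex - sx) - (1 if hit else 0)
--     # a piece at (ox, oy) blocks iff its signed offset along the move direction is
--     # equal on both axes and lies strictly between start and the allowed endpoint
--     obstacles = [p
--                  for pawns in allPositions.values()
--                  for ps in pawns.values()
--                  for p in ps
--                  if (topSignature.find(p[0]) - sx) * dx == (leftSignature.find(p[1]) - sy) * dy
--                  and 1 <= (topSignature.find(p[0]) - sx) * dx <= lim]
--     return (True, obstacles) if obstacles else (False, [])
-- ===== Notes on version B (the rewrite author's own statement) =====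
-- stated objective: simpler
-- what changed: B never walks the path at all: the on-board/diagonal validation collapses to the closed-form test 'end square found and |ex-sx|==|ey-sy|', and each piece is tested by one O(1) arithmetic condition on its signed offset along the move direction instead of A's inner scan over every step of the path.
import Mathlib
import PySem

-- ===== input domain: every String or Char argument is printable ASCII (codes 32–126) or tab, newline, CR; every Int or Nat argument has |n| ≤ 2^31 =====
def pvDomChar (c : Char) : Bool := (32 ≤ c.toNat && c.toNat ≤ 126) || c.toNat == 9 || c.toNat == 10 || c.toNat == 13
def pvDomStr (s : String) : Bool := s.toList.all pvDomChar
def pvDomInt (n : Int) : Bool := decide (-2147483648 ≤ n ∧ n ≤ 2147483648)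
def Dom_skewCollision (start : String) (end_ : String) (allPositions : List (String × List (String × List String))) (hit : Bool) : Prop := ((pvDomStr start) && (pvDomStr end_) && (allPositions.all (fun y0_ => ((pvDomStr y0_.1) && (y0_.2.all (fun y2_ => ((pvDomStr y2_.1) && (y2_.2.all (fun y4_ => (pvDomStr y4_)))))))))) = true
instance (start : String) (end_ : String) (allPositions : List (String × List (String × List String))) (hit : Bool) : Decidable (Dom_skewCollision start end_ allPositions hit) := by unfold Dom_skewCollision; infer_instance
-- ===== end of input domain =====

-- B never walks the path: validation collapses to the closed-form diagonal test
-- (end square found and |ex-sx| = |ey-sy|) and each piece is tested by one arithmetic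
-- condition on its signed offset along the move direction, with no per-step scan and no
-- path structure at all (objective: simpler).
-- The dict arguments are modelled via PySem.Dict.ofList (Python dict construction from pairs).

-- shared module constants (topSignature / leftSignature of the Python module)
def pvTop : List Char := "abcdefgh".toList
def pvLeft : List Char := "87654321".toList
-- sig.find(s[i]) for a one-character needle; total via pyGetD, exact under Pre_ (2 ≤ length)
def pvFind (sig : List Char) (s : List Char) (i : Int) : Int :=
  PySem.Chars.find sig [PySem.List.pyGetD s i ' ']

-- ===== PORT A =====
def skewCollision (start : String) (end_ : String) (allPositions : List (String × List (String × List String))) (hit : Bool) : Bool × List String :=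
  let sx := pvFind pvTop start.toList 0
  let sy := pvFind pvLeft start.toList 1
  let ex := pvFind pvTop end_.toList 0
  let ey := pvFind pvLeft end_.toList 1
  let ltr : Bool := decide (ex > sx)
  let ttb : Bool := decide (ey > sy)
  let d := |ex - sx|
  if sx + (if ltr then d else -d) > 7 ∨ sy + (if ttb then d else -d) > 7
      ∨ sx + (if ltr then d else -d) < 0 ∨ sy + (if ttb then d else -d) < 0 then
    (false, ["error"])
  else if PySem.List.pyGetD pvTop (sx + (if ltr then d else -d)) ' ' ≠ PySem.List.pyGetD end_.toList 0 ' '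
      ∨ PySem.List.pyGetD pvLeft (sy + (if ttb then d else -d)) ' ' ≠ PySem.List.pyGetD end_.toList 1 ' ' then
    (false, ["error"])
  else
    -- for color in allPositions: for pawn in allPositions[color]: for p in allPositions[color][pawn]:
    let obstacles := (PySem.Dict.ofList allPositions).items.foldl (fun acc1 cp =>
      (PySem.Dict.ofList cp.2).items.foldl (fun acc2 pp =>
        pp.2.foldl (fun acc3 p =>
          let ox := pvFind pvTop p.toList 0
          let oy := pvFind pvLeft p.toList 1
          (PySem.List.pyRange 1 (d + (if !hit then 1 else 0)) 1).foldl (fun acc4 i =>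
            if ox = sx + (if ltr then i else -i) ∧ oy = sy + (if ttb then i else -i)
            then acc4 ++ [p] else acc4) acc3) acc2) acc1) []
    if obstacles.length > 0 then (true, obstacles) else (false, [])

-- ===== PORT B =====
def skewCollision_alt (start : String) (end_ : String) (allPositions : List (String × List (String × List String))) (hit : Bool) : Bool × List String :=
  let sx := pvFind pvTop start.toList 0
  let sy := pvFind pvLeft start.toList 1
  let ex := pvFind pvTop end_.toList 0
  let ey := pvFind pvLeft end_.toList 1
  if ex < 0 ∨ ey < 0 ∨ |ex - sx| ≠ |ey - sy| then
    (false, ["error"])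
  else
    let dx : Int := if ex > sx then 1 else -1
    let dy : Int := if ey > sy then 1 else -1
    let lim := |ex - sx| - (if hit then 1 else 0)
    let obstacles := ((PySem.Dict.ofList allPositions).values.flatMap (fun pawns =>
        (PySem.Dict.ofList pawns).values.flatMap (fun ps => ps))).filter
      (fun p => decide ((pvFind pvTop p.toList 0 - sx) * dx = (pvFind pvLeft p.toList 1 - sy) * dy
         ∧ 1 ≤ (pvFind pvTop p.toList 0 - sx) * dx ∧ (pvFind pvTop p.toList 0 - sx) * dx ≤ lim))
    if obstacles.isEmpty then (false, []) else (true, obstacles)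

-- ===== PRECONDITION & SPEC =====
-- A's straight-line validation as a closed-form test: the end square is on the board and
-- the move is an exact diagonal (only then does A inspect the position strings)
def pvDiagOk (start : String) (end_ : String) : Bool :=
  let sx := pvFind pvTop start.toList 0
  let sy := pvFind pvLeft start.toList 1
  let ex := pvFind pvTop end_.toList 0
  let ey := pvFind pvLeft end_.toList 1
  decide (0 ≤ ex ∧ 0 ≤ ey ∧ |ex - sx| = |ey - sy|)

-- Pre_ excludes exactly the inputs on which A raises IndexError: start or end_ shorter than
-- two characters, or (only when the validation passes, so the position strings are indexed)
-- a position string shorter than two characters.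
def Pre_skewCollision (start : String) (end_ : String) (allPositions : List (String × List (String × List String))) (hit : Bool) : Prop :=
  2 ≤ start.length ∧ 2 ≤ end_.length ∧
    (pvDiagOk start end_ = true →
      allPositions.all (fun cp => cp.2.all (fun pp => pp.2.all (fun p => 2 ≤ p.length))) = true)
instance (start : String) (end_ : String) (allPositions : List (String × List (String × List String))) (hit : Bool) : Decidable (Pre_skewCollision start end_ allPositions hit) := by unfold Pre_skewCollision; infer_instance

def pvWitness_skewCollision : String × String × (List (String × List (String × List String))) × Bool :=
  ("a7", "c5", [("white", [("pawn", ["b6"])])], false)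

def Spec_skewCollision (start : String) (end_ : String) (allPositions : List (String × List (String × List String))) (hit : Bool) (out : Bool × List String) : Prop := out = skewCollision_alt start end_ allPositions hit
instance (start : String) (end_ : String) (allPositions : List (String × List (String × List String))) (hit : Bool) (out : Bool × List String) : Decidable (Spec_skewCollision start end_ allPositions hit out) := by unfold Spec_skewCollision; infer_instance

-- ===== CLAIM (what is proved, stated in full; the proofs are below) =====
def Claim_equal_skewCollision : Prop := ∀ (start : String) (end_ : String) (allPositions : List (String × List (String × List String))) (hit : Bool), Dom_skewCollision start end_ allPositions hit → Pre_skewCollision start end_ allPositions hit → Spec_skewCollision start end_ allPositions hit (skewCollision start end_ allPositions hit)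

-- ===== LEMMAS AND PROOFS =====

theorem pv_singleton_prefix_iff (sig : List Char) (n : Nat) (h : n < sig.length) (c : Char) :
    [c] <+: sig.drop n ↔ sig[n] = c := by
  rw [List.drop_eq_getElem_cons h]
  constructor
  · rintro ⟨t, ht⟩
    simp only [List.cons_append, List.nil_append, List.cons.injEq] at ht
    exact ht.1.symm
  · intro hc
    exact ⟨sig.drop (n + 1), by simp [hc]⟩

theorem pv_find_lt (sig : List Char) (c : Char) (h : 0 ≤ PySem.Chars.find sig [c]) :
    PySem.Chars.find sig [c] < sig.length := by
  rcases lt_or_eq_of_le (PySem.Chars.find_le_length sig [c]) with hlt | heq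
  · exact hlt
  · exfalso
    have hpre := (PySem.Chars.find_spec h).1
    rw [heq] at hpre
    simp at hpre

theorem pv_getD_eq_iff (sig : List Char) (hnd : sig.Nodup) (c : Char) (k : Int)
    (h0 : 0 ≤ k) (h1 : k < (sig.length : Int)) :
    PySem.List.pyGetD sig k ' ' = c ↔ PySem.Chars.find sig [c] = k := by
  have hk : k.toNat < sig.length := by omega
  rw [PySem.List.pyGetD_eq_getElem sig ' ' h0 h1]
  constructor
  · intro h
    have hinf : [c] <+: sig.drop k.toNat := (pv_singleton_prefix_iff sig k.toNat hk c).mpr h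
    have h0f : 0 ≤ PySem.Chars.find sig [c] :=
      (PySem.Chars.find_nonneg_iff _ _).mpr (hinf.isInfix.trans (sig.drop_suffix k.toNat).isInfix)
    have hflt := pv_find_lt sig c h0f
    have hfn : (PySem.Chars.find sig [c]).toNat < sig.length := by omega
    have hc2 : sig[(PySem.Chars.find sig [c]).toNat] = c :=
      (pv_singleton_prefix_iff sig _ hfn c).mp (PySem.Chars.find_spec h0f).1
    have : (PySem.Chars.find sig [c]).toNat = k.toNat := by
      exact (hnd.getElem_inj_iff).mp (hc2.trans h.symm)
    omega
  · intro h
    have h0f : 0 ≤ PySem.Chars.find sig [c] := by omega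
    have := (PySem.Chars.find_spec h0f).1
    rw [h] at this
    exact (pv_singleton_prefix_iff sig k.toNat hk c).mp this

theorem pv_mem_map_range_iff (sx sy N : Int) (dxv dyv : Int)
    (hdx : dxv = 1 ∨ dxv = -1) (hdy : dyv = 1 ∨ dyv = -1) (ox oy : Int) :
    ((ox, oy) ∈ (PySem.List.pyRange 1 N 1).map (fun s => (sx + dxv * s, sy + dyv * s))) ↔
      ((ox - sx) * dxv = (oy - sy) * dyv ∧ 1 ≤ (ox - sx) * dxv ∧ (ox - sx) * dxv ≤ N - 1) := by
  simp only [List.mem_map, PySem.List.mem_pyRange_one, Prod.mk.injEq]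
  rcases hdx with rfl | rfl <;> rcases hdy with rfl | rfl <;>
    simp only [one_mul, mul_one, neg_one_mul, mul_neg_one] <;>
    constructor
  · rintro ⟨i, ⟨h1, h2⟩, h3, h4⟩; omega
  · rintro ⟨h1, h2, h3⟩; exact ⟨ox - sx, by omega, by omega, by omega⟩
  · rintro ⟨i, ⟨h1, h2⟩, h3, h4⟩; omega
  · rintro ⟨h1, h2, h3⟩; exact ⟨ox - sx, by omega, by omega, by omega⟩
  · rintro ⟨i, ⟨h1, h2⟩, h3, h4⟩; omega
  · rintro ⟨h1, h2, h3⟩; exact ⟨sx - ox, by omega, by omega, by omega⟩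
  · rintro ⟨i, ⟨h1, h2⟩, h3, h4⟩; omega
  · rintro ⟨h1, h2, h3⟩; exact ⟨sx - ox, by omega, by omega, by omega⟩

theorem pv_filter_once {β γ : Type} [DecidableEq β] (l : List Int) (f : Int → β)
    (hnd : l.Nodup) (hf : ∀ a b : Int, f a = f b → a = b) (v : β) (p : γ) :
    ((l.filter (fun i => decide (f i = v))).map (fun _ => p))
      = if v ∈ l.map f then [p] else [] := by
  induction l with
  | nil => simp
  | cons a t ih =>
    simp only [List.nodup_cons] at hnd
    by_cases h : f a = v
    · have ht : t.filter (fun i => decide (f i = v)) = [] := by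
        apply List.filter_eq_nil_iff.mpr
        intro b hb hfb
        simp only [decide_eq_true_eq] at hfb
        exact hnd.1 (hf b a (hfb.trans h.symm) ▸ hb)
      simp [h, ht]
    · simp only [List.filter_cons, decide_eq_true_eq, if_neg h, List.map_cons, ih hnd.2]
      have hne : ¬ (v = f a) := fun e => h e.symm
      simp [hne]

theorem pv_flatMap_ite {α : Type} (l : List α) (c : α → Prop) [DecidablePred c] :
    (l.flatMap (fun p => if c p then [p] else [])) = l.filter (fun p => decide (c p)) := by
  induction l with
  | nil => rfl
  | cons a t ih => by_cases h : c a <;> simp [h, ih]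

theorem pv_values_eq {κ ν : Type} (d : PySem.Dict κ ν) : d.values = d.items.map Prod.snd := rfl

theorem pv_main (sx sy N : Int) (dxv dyv : Int) (σx σy : Int → Int)
    (hσx : ∀ i, σx i = dxv * i) (hσy : ∀ i, σy i = dyv * i)
    (hdx : dxv = 1 ∨ dxv = -1) (hdy : dyv = 1 ∨ dyv = -1)
    (ap : List (String × List (String × List String))) :
    (PySem.Dict.ofList ap).items.foldl (fun acc1 cp =>
      (PySem.Dict.ofList cp.2).items.foldl (fun acc2 pp =>
        pp.2.foldl (fun acc3 p =>
          (PySem.List.pyRange 1 N 1).foldl (fun acc4 i =>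
            if pvFind pvTop p.toList 0 = sx + σx i ∧ pvFind pvLeft p.toList 1 = sy + σy i
            then acc4 ++ [p] else acc4) acc3) acc2) acc1) []
    = ((PySem.Dict.ofList ap).values.flatMap (fun pawns =>
        (PySem.Dict.ofList pawns).values.flatMap (fun ps => ps))).filter
      (fun p => decide ((pvFind pvTop p.toList 0 - sx) * dxv = (pvFind pvLeft p.toList 1 - sy) * dyv
         ∧ 1 ≤ (pvFind pvTop p.toList 0 - sx) * dxv ∧ (pvFind pvTop p.toList 0 - sx) * dxv ≤ N - 1)) := by
  have hinj : ∀ a b : Int, (sx + dxv * a, sy + dyv * a) = (sx + dxv * b, sy + dyv * b) → a = b := by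
    intro a b h
    have h1 : sx + dxv * a = sx + dxv * b := congrArg Prod.fst h
    rcases hdx with rfl | rfl <;> omega
  have hstep : ∀ (acc : List String) (p : String),
      (PySem.List.pyRange 1 N 1).foldl (fun acc4 i =>
        if pvFind pvTop p.toList 0 = sx + σx i ∧ pvFind pvLeft p.toList 1 = sy + σy i
        then acc4 ++ [p] else acc4) acc
      = acc ++ (if (pvFind pvTop p.toList 0 - sx) * dxv = (pvFind pvLeft p.toList 1 - sy) * dyv
            ∧ 1 ≤ (pvFind pvTop p.toList 0 - sx) * dxv ∧ (pvFind pvTop p.toList 0 - sx) * dxv ≤ N - 1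
          then [p] else []) := by
    intro acc p
    simp only [hσx, hσy]
    rw [PySem.List.foldl_append_ite
      (p := fun i => pvFind pvTop p.toList 0 = sx + dxv * i ∧ pvFind pvLeft p.toList 1 = sy + dyv * i)
      (f := fun _ => p)]
    rw [List.filter_congr (q := fun i => decide
        ((fun s => (sx + dxv * s, sy + dyv * s)) i = (pvFind pvTop p.toList 0, pvFind pvLeft p.toList 1)))
      (fun i _ => by rw [decide_eq_decide]; constructor
                     · rintro ⟨h1, h2⟩; simp [h1, h2]
                     · intro h; rw [Prod.ext_iff] at h; exact ⟨h.1.symm, h.2.symm⟩)]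
    rw [pv_filter_once _ _ (PySem.List.nodup_pyRange_one 1 N) hinj]
    simp only [pv_mem_map_range_iff sx sy N dxv dyv hdx hdy]
  simp only [hstep, PySem.List.foldl_append_eq_flatMap, List.nil_append]
  simp only [pv_values_eq, List.flatMap_map]
  have h1 : ∀ (l : List String), l.flatMap (fun p =>
      if (pvFind pvTop p.toList 0 - sx) * dxv = (pvFind pvLeft p.toList 1 - sy) * dyv
          ∧ 1 ≤ (pvFind pvTop p.toList 0 - sx) * dxv ∧ (pvFind pvTop p.toList 0 - sx) * dxv ≤ N - 1
        then [p] else [])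
      = l.filter (fun p => decide ((pvFind pvTop p.toList 0 - sx) * dxv = (pvFind pvLeft p.toList 1 - sy) * dyv
          ∧ 1 ≤ (pvFind pvTop p.toList 0 - sx) * dxv ∧ (pvFind pvTop p.toList 0 - sx) * dxv ≤ N - 1)) := by
    intro l
    exact pv_flatMap_ite l _
  simp only [h1, List.filter_flatMap]

theorem pv_tail {α : Type} (F : List α) :
    (if F.length > 0 then ((true : Bool), F) else (false, ([] : List α)))
      = (if F.isEmpty then (false, []) else (true, F)) := by
  cases F <;> simp

theorem pv_branch (sx sy ex ey fx fy N lim : Int) (dxv dyv : Int) (σx σy : Int → Int)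
    (hσx : ∀ i, σx i = dxv * i) (hσy : ∀ i, σy i = dyv * i)
    (hdx1 : sx < ex → dxv = 1) (hdx2 : ¬ sx < ex → dxv = -1)
    (hdy1 : sy < ey → dyv = 1) (hdy2 : ¬ sy < ey → dyv = -1)
    (hfx : fx = sx + dxv * |ex - sx|) (hfy : fy = sy + dyv * |ex - sx|)
    (hN : N = lim + 1) (hlim : lim = |ex - sx| ∨ lim = |ex - sx| - 1)
    (end_ : String)
    (hex : ex = PySem.Chars.find pvTop [PySem.List.pyGetD end_.toList 0 ' '])
    (hey : ey = PySem.Chars.find pvLeft [PySem.List.pyGetD end_.toList 1 ' '])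
    (ap : List (String × List (String × List String))) :
    (if fx > 7 ∨ fy > 7 ∨ fx < 0 ∨ fy < 0 then ((false : Bool), ["error"])
     else if PySem.List.pyGetD pvTop fx ' ' ≠ PySem.List.pyGetD end_.toList 0 ' '
         ∨ PySem.List.pyGetD pvLeft fy ' ' ≠ PySem.List.pyGetD end_.toList 1 ' ' then
       (false, ["error"])
     else
       let obstacles := (PySem.Dict.ofList ap).items.foldl (fun acc1 cp =>
         (PySem.Dict.ofList cp.2).items.foldl (fun acc2 pp =>
           pp.2.foldl (fun acc3 p =>
             (PySem.List.pyRange 1 N 1).foldl (fun acc4 i =>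
               if pvFind pvTop p.toList 0 = sx + σx i ∧ pvFind pvLeft p.toList 1 = sy + σy i
               then acc4 ++ [p] else acc4) acc3) acc2) acc1) []
       if obstacles.length > 0 then (true, obstacles) else (false, []))
    = (if ex < 0 ∨ ey < 0 ∨ |ex - sx| ≠ |ey - sy| then (false, ["error"])
       else
         let obstacles := ((PySem.Dict.ofList ap).values.flatMap (fun pawns =>
             (PySem.Dict.ofList pawns).values.flatMap (fun ps => ps))).filter
           (fun p => decide ((pvFind pvTop p.toList 0 - sx) * dxv = (pvFind pvLeft p.toList 1 - sy) * dyv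
              ∧ 1 ≤ (pvFind pvTop p.toList 0 - sx) * dxv ∧ (pvFind pvTop p.toList 0 - sx) * dxv ≤ lim))
         if obstacles.isEmpty then (false, []) else (true, obstacles)) := by
  have hdx : dxv = 1 ∨ dxv = -1 := by
    by_cases h : sx < ex
    · exact Or.inl (hdx1 h)
    · exact Or.inr (hdx2 h)
  have hdy : dyv = 1 ∨ dyv = -1 := by
    by_cases h : sy < ey
    · exact Or.inl (hdy1 h)
    · exact Or.inr (hdy2 h)
  have habsx := abs_choice (ex - sx)
  have habsy := abs_choice (ey - sy)
  have habsnn : 0 ≤ |ex - sx| ∧ 0 ≤ |ey - sy| := ⟨abs_nonneg _, abs_nonneg _⟩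
  -- fx is always the end column index
  have hfxex : fx = ex := by
    by_cases h : sx < ex
    · rw [hfx, hdx1 h, one_mul]; omega
    · rw [hfx, hdx2 h, neg_one_mul]; omega
  have hexlb : -1 ≤ ex := hex ▸ PySem.Chars.neg_one_le_find pvTop _
  have heylb : -1 ≤ ey := hey ▸ PySem.Chars.neg_one_le_find pvLeft _
  have hndT : pvTop.Nodup := by decide
  have hndL : pvLeft.Nodup := by decide
  have hlenT : (pvTop.length : Int) = 8 := by decide
  have hlenL : (pvLeft.length : Int) = 8 := by decide
  by_cases hB : ex < 0 ∨ ey < 0 ∨ |ex - sx| ≠ |ey - sy|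
  · -- B reports "error"; show A does too
    rw [if_pos hB]
    by_cases hA1 : fx > 7 ∨ fy > 7 ∨ fx < 0 ∨ fy < 0
    · rw [if_pos hA1]
    · -- bounds pass, so the y char test must fail
      push_neg at hA1
      have hfy7 : fy ≤ 7 ∧ 0 ≤ fy := ⟨hA1.2.1, hA1.2.2.2⟩
      have hex0 : 0 ≤ ex := by omega
      have hey_ne : ey ≠ fy := by
        intro hEq
        have h1 : 0 ≤ ey := by omega
        have h2 : |ex - sx| = |ey - sy| := by
          by_cases h : sy < ey
          · rw [hfy, hdy1 h, one_mul] at hEq; omega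
          · rw [hfy, hdy2 h, neg_one_mul] at hEq; omega
        exact (by omega : ¬ (ex < 0 ∨ ey < 0 ∨ |ex - sx| ≠ |ey - sy|)) hB
      have hychar : PySem.List.pyGetD pvLeft fy ' ' ≠ PySem.List.pyGetD end_.toList 1 ' ' := by
        intro hc
        exact hey_ne (by
          have := (pv_getD_eq_iff pvLeft hndL (PySem.List.pyGetD end_.toList 1 ' ') fy
            hfy7.2 (by omega)).mp hc
          omega)
      have hA1' : ¬ (fx > 7 ∨ fy > 7 ∨ fx < 0 ∨ fy < 0) := by omega
      rw [if_neg hA1', if_pos (Or.inr hychar)]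
  · -- validation passes on both sides
    push_neg at hB
    obtain ⟨hex0, hey0, habs⟩ := hB
    have hexlt : ex < 8 := by
      have := pv_find_lt pvTop (PySem.List.pyGetD end_.toList 0 ' ') (by omega)
      omega
    have heylt : ey < 8 := by
      have := pv_find_lt pvLeft (PySem.List.pyGetD end_.toList 1 ' ') (by omega)
      omega
    have hfyey : fy = ey := by
      by_cases h : sy < ey
      · rw [hfy, hdy1 h, one_mul]; omega
      · rw [hfy, hdy2 h, neg_one_mul]; omega
    have hxchar : PySem.List.pyGetD pvTop fx ' ' = PySem.List.pyGetD end_.toList 0 ' ' :=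
      (pv_getD_eq_iff pvTop hndT _ fx (by omega) (by omega)).mpr (by omega)
    have hychar : PySem.List.pyGetD pvLeft fy ' ' = PySem.List.pyGetD end_.toList 1 ' ' :=
      (pv_getD_eq_iff pvLeft hndL _ fy (by omega) (by omega)).mpr (by omega)
    have hA1' : ¬ (fx > 7 ∨ fy > 7 ∨ fx < 0 ∨ fy < 0) := by omega
    have hA2' : ¬ (PySem.List.pyGetD pvTop fx ' ' ≠ PySem.List.pyGetD end_.toList 0 ' '
        ∨ PySem.List.pyGetD pvLeft fy ' ' ≠ PySem.List.pyGetD end_.toList 1 ' ') := by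
      push_neg; exact ⟨hxchar, hychar⟩
    have hB1' : ¬ (ex < 0 ∨ ey < 0 ∨ |ex - sx| ≠ |ey - sy|) := by omega
    rw [if_neg hA1', if_neg hA2', if_neg hB1']
    have hlimN : lim = N - 1 := by omega
    rw [pv_main sx sy N dxv dyv σx σy hσx hσy hdx hdy ap, hlimN]
    exact pv_tail _

theorem pv_core (sx sy ex ey : Int) (end_ : String)
    (hex : ex = PySem.Chars.find pvTop [PySem.List.pyGetD end_.toList 0 ' '])
    (hey : ey = PySem.Chars.find pvLeft [PySem.List.pyGetD end_.toList 1 ' '])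
    (allPositions : List (String × List (String × List String))) (hit : Bool) :
    (let ltr : Bool := decide (ex > sx)
     let ttb : Bool := decide (ey > sy)
     let d := |ex - sx|
     if sx + (if ltr then d else -d) > 7 ∨ sy + (if ttb then d else -d) > 7
         ∨ sx + (if ltr then d else -d) < 0 ∨ sy + (if ttb then d else -d) < 0 then
       ((false : Bool), ["error"])
     else if PySem.List.pyGetD pvTop (sx + (if ltr then d else -d)) ' ' ≠ PySem.List.pyGetD end_.toList 0 ' '
         ∨ PySem.List.pyGetD pvLeft (sy + (if ttb then d else -d)) ' ' ≠ PySem.List.pyGetD end_.toList 1 ' ' then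
       (false, ["error"])
     else
       let obstacles := (PySem.Dict.ofList allPositions).items.foldl (fun acc1 cp =>
         (PySem.Dict.ofList cp.2).items.foldl (fun acc2 pp =>
           pp.2.foldl (fun acc3 p =>
             let ox := pvFind pvTop p.toList 0
             let oy := pvFind pvLeft p.toList 1
             (PySem.List.pyRange 1 (d + (if !hit then 1 else 0)) 1).foldl (fun acc4 i =>
               if ox = sx + (if ltr then i else -i) ∧ oy = sy + (if ttb then i else -i)
               then acc4 ++ [p] else acc4) acc3) acc2) acc1) []
       if obstacles.length > 0 then (true, obstacles) else (false, []))
    = (if ex < 0 ∨ ey < 0 ∨ |ex - sx| ≠ |ey - sy| then (false, ["error"])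
       else
         let dx : Int := if ex > sx then 1 else -1
         let dy : Int := if ey > sy then 1 else -1
         let lim := |ex - sx| - (if hit then 1 else 0)
         let obstacles := ((PySem.Dict.ofList allPositions).values.flatMap (fun pawns =>
             (PySem.Dict.ofList pawns).values.flatMap (fun ps => ps))).filter
           (fun p => decide ((pvFind pvTop p.toList 0 - sx) * dx = (pvFind pvLeft p.toList 1 - sy) * dy
              ∧ 1 ≤ (pvFind pvTop p.toList 0 - sx) * dx ∧ (pvFind pvTop p.toList 0 - sx) * dx ≤ lim))
         if obstacles.isEmpty then (false, []) else (true, obstacles)) := by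
  cases hit <;> by_cases hex1 : sx < ex <;> by_cases hey1 : sy < ey <;>
    simp only [gt_iff_lt, hex1, hey1, decide_true, decide_false, if_true, if_false,
      Bool.not_true, Bool.not_false, Bool.false_eq_true, Bool.true_eq_false, add_zero, sub_zero]
  · exact pv_branch sx sy ex ey (sx + |ex - sx|) (sy + |ex - sx|) (|ex - sx| + 1) (|ex - sx|)
      1 1 (fun i => i) (fun i => i) (fun i => (one_mul i).symm) (fun i => (one_mul i).symm)
      (fun _ => rfl) (fun h => absurd hex1 h) (fun _ => rfl) (fun h => absurd hey1 h)
      (by rw [one_mul]) (by rw [one_mul]) (by omega) (Or.inl rfl) end_ hex hey allPositions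
  · exact pv_branch sx sy ex ey (sx + |ex - sx|) (sy + -|ex - sx|) (|ex - sx| + 1) (|ex - sx|)
      1 (-1) (fun i => i) (fun i => -i) (fun i => (one_mul i).symm) (fun i => (neg_one_mul i).symm)
      (fun _ => rfl) (fun h => absurd hex1 h) (fun h => absurd h hey1) (fun _ => rfl)
      (by rw [one_mul]) (by rw [neg_one_mul]) (by omega) (Or.inl rfl) end_ hex hey allPositions
  · exact pv_branch sx sy ex ey (sx + -|ex - sx|) (sy + |ex - sx|) (|ex - sx| + 1) (|ex - sx|)
      (-1) 1 (fun i => -i) (fun i => i) (fun i => (neg_one_mul i).symm) (fun i => (one_mul i).symm)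
      (fun h => absurd h hex1) (fun _ => rfl) (fun _ => rfl) (fun h => absurd hey1 h)
      (by rw [neg_one_mul]) (by rw [one_mul]) (by omega) (Or.inl rfl) end_ hex hey allPositions
  · exact pv_branch sx sy ex ey (sx + -|ex - sx|) (sy + -|ex - sx|) (|ex - sx| + 1) (|ex - sx|)
      (-1) (-1) (fun i => -i) (fun i => -i) (fun i => (neg_one_mul i).symm) (fun i => (neg_one_mul i).symm)
      (fun h => absurd h hex1) (fun _ => rfl) (fun h => absurd h hey1) (fun _ => rfl)
      (by rw [neg_one_mul]) (by rw [neg_one_mul]) (by omega) (Or.inl rfl) end_ hex hey allPositions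
  · exact pv_branch sx sy ex ey (sx + |ex - sx|) (sy + |ex - sx|) (|ex - sx|) (|ex - sx| - 1)
      1 1 (fun i => i) (fun i => i) (fun i => (one_mul i).symm) (fun i => (one_mul i).symm)
      (fun _ => rfl) (fun h => absurd hex1 h) (fun _ => rfl) (fun h => absurd hey1 h)
      (by rw [one_mul]) (by rw [one_mul]) (by omega) (Or.inr rfl) end_ hex hey allPositions
  · exact pv_branch sx sy ex ey (sx + |ex - sx|) (sy + -|ex - sx|) (|ex - sx|) (|ex - sx| - 1)
      1 (-1) (fun i => i) (fun i => -i) (fun i => (one_mul i).symm) (fun i => (neg_one_mul i).symm)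
      (fun _ => rfl) (fun h => absurd hex1 h) (fun h => absurd h hey1) (fun _ => rfl)
      (by rw [one_mul]) (by rw [neg_one_mul]) (by omega) (Or.inr rfl) end_ hex hey allPositions
  · exact pv_branch sx sy ex ey (sx + -|ex - sx|) (sy + |ex - sx|) (|ex - sx|) (|ex - sx| - 1)
      (-1) 1 (fun i => -i) (fun i => i) (fun i => (neg_one_mul i).symm) (fun i => (one_mul i).symm)
      (fun h => absurd h hex1) (fun _ => rfl) (fun _ => rfl) (fun h => absurd hey1 h)
      (by rw [neg_one_mul]) (by rw [one_mul]) (by omega) (Or.inr rfl) end_ hex hey allPositions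
  · exact pv_branch sx sy ex ey (sx + -|ex - sx|) (sy + -|ex - sx|) (|ex - sx|) (|ex - sx| - 1)
      (-1) (-1) (fun i => -i) (fun i => -i) (fun i => (neg_one_mul i).symm) (fun i => (neg_one_mul i).symm)
      (fun h => absurd h hex1) (fun _ => rfl) (fun h => absurd h hey1) (fun _ => rfl)
      (by rw [neg_one_mul]) (by rw [neg_one_mul]) (by omega) (Or.inr rfl) end_ hex hey allPositions

-- ===== VERDICT (by name: the statement is the Claim_ definition above) =====
theorem skewCollision_spec : Claim_equal_skewCollision := by
  intro start end_ allPositions hit _ _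
  unfold Spec_skewCollision skewCollision skewCollision_alt
  exact pv_core (pvFind pvTop start.toList 0) (pvFind pvLeft start.toList 1)
    (pvFind pvTop end_.toList 0) (pvFind pvLeft end_.toList 1) end_ rfl rfl allPositions hit
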